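-- pv_equiv track=rewrite | github.com/hellohaptik/chatbot_ner | lib/nlp/ngram.py | ngram_list
-- ===== SOURCE A (Python) =====
-- def ngram_list(ngram, word_list, stop_word_list=None):
--     """This function will get the list of ngrams. If the ngram contains all the stop words then it will not be
--         appended in the list
--
--     Args:
--         ngram: i.e. 1, 2, 3...
--         word_list: list of words
--         stop_word_list: list of words that should be excluded while obtaining list of ngrams
--
--     Returns:
--         List of ngrams
--     """
--
--     ngram_list = []
--     if len(word_list) >= ngram:
--         n = 0
--         for n in range(0, len(word_list) - ngram + 1):
--             location = 0
--             data = ''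
--             count_stop_word = 0
--             while location < ngram:
--                 if stop_word_list and (str(word_list[n + location].lower()) in stop_word_list):
--                     count_stop_word += 1
--                 data += word_list[n + location] + ' '
--                 location += 1
--             if count_stop_word < ngram:
--                 ngram_list.append(data.strip())
--             n += 1
--
--     return ngram_list
-- ===== SOURCE B (Python) =====
-- def ngram_list(ngram, word_list, stop_word_list=None):
--     result = []
--     if ngram < 1 or len(word_list) < ngram:
--         return result
--     stops = set(stop_word_list) if stop_word_list else None
--     flags = [1 if stops is not None and w.lower() in stops else 0 for w in word_list]
--     cum = [0]
--     for f in flags: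
--         cum.append(cum[-1] + f)
--     for i in range(len(word_list) - ngram + 1):
--         if cum[i + ngram] - cum[i] < ngram:
--             result.append(' '.join(word_list[i:i + ngram]).strip())
--     return result
-- ===== Notes on version B (the rewrite author's own statement) =====
-- stated objective: faster
-- what changed: B lowercases and stop-tests each word exactly once into a 0/1 flag list (with a set for membership), builds a prefix-sum table of the flags, and then decides each window by one O(1) subtraction and emits ' '.join(window).strip(), instead of A's per-window inner loop that re-lowercases every word and rescans the stop list while re-concatenating the window by hand.
import Mathlib
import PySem

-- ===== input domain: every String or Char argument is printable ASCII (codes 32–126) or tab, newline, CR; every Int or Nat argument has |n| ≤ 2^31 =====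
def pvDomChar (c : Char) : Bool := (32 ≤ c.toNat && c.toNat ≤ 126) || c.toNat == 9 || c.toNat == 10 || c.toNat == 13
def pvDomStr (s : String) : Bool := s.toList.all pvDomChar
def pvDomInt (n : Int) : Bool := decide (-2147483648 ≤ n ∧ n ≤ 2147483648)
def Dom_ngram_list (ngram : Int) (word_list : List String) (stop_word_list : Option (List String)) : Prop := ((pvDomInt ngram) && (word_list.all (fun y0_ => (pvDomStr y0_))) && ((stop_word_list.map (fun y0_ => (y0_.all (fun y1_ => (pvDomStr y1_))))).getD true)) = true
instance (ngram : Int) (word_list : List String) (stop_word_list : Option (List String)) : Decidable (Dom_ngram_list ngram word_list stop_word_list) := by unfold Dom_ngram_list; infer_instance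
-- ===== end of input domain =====

-- B computes each word's stop-word flag once (with a set) and a prefix-sum table, replacing
-- A's per-window rescan (re-lowercasing every word and re-scanning the stop list for each window).

-- ===== PORT A =====
-- Python truthiness of the optional stop-word list ('if stop_word_list ...')
def pvTruthy (s : Option (List String)) : Bool :=
  match s with
  | some (_ :: _) => true
  | _ => false

-- the inner 'while location < ngram' loop of A; fuel = ngram.toNat (number of remaining iterations)
def ngramInnerA (ngram : Int) (wl : List String) (swl : Option (List String)) (n : Int) :
    Int → Int → List Char → Nat → Int × List Char
  | _, count, data, 0 => (count, data)
  | location, count, data, fuel + 1 =>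
    if location < ngram then
      let w := PySem.List.pyGetD wl (n + location) ""   -- word_list[n + location]; index always in range here
      let count' := if pvTruthy swl && (swl.getD []).contains (PySem.Str.lower w) then count + 1 else count
      ngramInnerA ngram wl swl n (location + 1) count' (data ++ w.toList ++ [' ']) fuel
    else (count, data)

def ngram_list (ngram : Int) (word_list : List String) (stop_word_list : Option (List String)) : List String :=
  let res : List String := []
  if ngram ≤ PySem.List.len word_list then
    (PySem.List.pyRange 0 (PySem.List.len word_list - ngram + 1) 1).foldl (fun acc n =>
      let r := ngramInnerA ngram word_list stop_word_list n 0 0 [] ngram.toNat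
      if r.1 < ngram then acc ++ [String.ofList (PySem.Chars.strip r.2)] else acc) res
  else res

-- ===== PORT B =====
-- stops = set(stop_word_list) if stop_word_list else None
def pvStops (stop_word_list : Option (List String)) : Option (PySem.Set String) :=
  match stop_word_list with
  | some (x :: xs) => some (PySem.Set.ofList (x :: xs))
  | _ => none

-- 1 if stops is not None and w.lower() in stops else 0
def pvFlag (stops : Option (PySem.Set String)) (w : String) : Int :=
  match stops with
  | some s => if PySem.Set.contains s (PySem.Str.lower w) then 1 else 0
  | none => 0

def ngram_list_alt (ngram : Int) (word_list : List String) (stop_word_list : Option (List String)) : List String :=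
  if ngram < 1 ∨ PySem.List.len word_list < ngram then []
  else
    let stops : Option (PySem.Set String) := pvStops stop_word_list
    let flags : List Int := word_list.map (pvFlag stops)
    let cum : List Int := flags.foldl (fun c f => c ++ [PySem.List.pyGetD c (-1) 0 + f]) [0]
    (PySem.List.pyRange 0 (PySem.List.len word_list - ngram + 1) 1).foldl (fun acc i =>
      if PySem.List.pyGetD cum (i + ngram) 0 - PySem.List.pyGetD cum i 0 < ngram then
        acc ++ [PySem.Str.strip (PySem.Str.join " " (PySem.List.slice word_list (some i) (some (i + ngram))))]
      else acc) []

-- ===== PRECONDITION & SPEC =====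
def Spec_ngram_list (ngram : Int) (word_list : List String) (stop_word_list : Option (List String)) (out : List String) : Prop := out = ngram_list_alt ngram word_list stop_word_list
instance (ngram : Int) (word_list : List String) (stop_word_list : Option (List String)) (out : List String) : Decidable (Spec_ngram_list ngram word_list stop_word_list out) := by unfold Spec_ngram_list; infer_instance

-- ===== CLAIM (what is proved, stated in full; the proofs are below) =====
def Claim_equal_ngram_list : Prop := ∀ (ngram : Int) (word_list : List String) (stop_word_list : Option (List String)), Dom_ngram_list ngram word_list stop_word_list → Spec_ngram_list ngram word_list stop_word_list (ngram_list ngram word_list stop_word_list)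

-- ===== LEMMAS AND PROOFS =====

-- the per-word stop test both programs evaluate
def pvTest (swl : Option (List String)) (w : String) : Bool :=
  pvTruthy swl && (swl.getD []).contains (PySem.Str.lower w)

-- words of the window concatenated each with a trailing space (what A's data accumulates)
def pvConcatSp (ws : List String) : List Char :=
  (ws.map (fun w => w.toList ++ [' '])).flatten

lemma pvConcatSp_cons (w : String) (ws : List String) :
    pvConcatSp (w :: ws) = w.toList ++ [' '] ++ pvConcatSp ws := by
  simp [pvConcatSp]

-- characterisation of A's inner while loop
lemma ngramInnerA_spec (wl : List String) (swl : Option (List String)) (k : Nat)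
    (m : Nat) (hm : m + k ≤ wl.length) :
    ∀ (f j : Nat), j + f = k → ∀ (count : Int) (data : List Char),
      ngramInnerA (k : Int) wl swl (m : Int) (j : Int) count data f =
        (count + ((((wl.drop (m + j)).take f).countP (pvTest swl) : Nat) : Int),
         data ++ pvConcatSp ((wl.drop (m + j)).take f)) := by
  intro f
  induction f with
  | zero => intro j hj count data; simp [ngramInnerA, pvConcatSp]
  | succ f ih =>
    intro j hj count data
    have hjk : (j : Int) < (k : Int) := by exact_mod_cast (by omega : j < k)
    have hidx : m + j < wl.length := by omega
    have hget : PySem.List.pyGetD wl ((m : Int) + (j : Int)) "" = wl[m + j] := by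
      have h1 : ((m : Int) + (j : Int)) = ((m + j : Nat) : Int) := by push_cast; ring
      rw [h1, PySem.List.pyGetD_natCast]
      simp [List.getD, hidx]
    have hdt : (wl.drop (m + j)).take (f + 1) = wl[m + j] :: (wl.drop (m + j + 1)).take f := by
      rw [List.drop_eq_getElem_cons hidx]
      simp [Nat.add_assoc]
    simp only [ngramInnerA, if_pos hjk, hget]
    rw [show (j : Int) + 1 = ((j + 1 : Nat) : Int) by push_cast; ring]
    rw [ih (j + 1) (by omega)]
    rw [hdt, show m + (j + 1) = m + j + 1 by omega]
    rw [List.countP_cons]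
    simp only [pvConcatSp_cons, Prod.mk.injEq]
    constructor
    · show (if pvTest swl wl[m + j] = true then count + 1 else count) + _ = _
      by_cases hc : pvTest swl wl[m + j] = true
      · rw [if_pos hc, if_pos hc]; push_cast; ring
      · rw [if_neg hc, if_neg hc]; push_cast; ring
    · simp [List.append_assoc]

-- stripping the trailing space A always appends
lemma strip_append_space (cs : List Char) :
    PySem.Chars.strip (cs ++ [' ']) = PySem.Chars.strip cs := by
  have hsp : PySem.Chars.isspace ' ' = true := by decide
  simp only [PySem.Chars.strip, PySem.Chars.lstrip, PySem.Chars.rstrip]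
  rw [List.dropWhile_append]
  rcases h : List.dropWhile PySem.Chars.isspace cs with _ | ⟨a, t⟩
  · simp [List.dropWhile, hsp]
  · simp only [List.isEmpty_cons, Bool.false_eq_true, if_false]
    simp [hsp]

-- A's "concat with trailing spaces, then strip" equals B's "join, then strip" on a nonempty window
lemma strip_concat_eq_strip_join (ws : List String) (hne : ws ≠ []) :
    PySem.Chars.strip (pvConcatSp ws) =
      PySem.Chars.strip (PySem.Chars.join (" ".toList) (ws.map String.toList)) := by
  have key : ∀ (t : List String) (w : String), pvConcatSp (w :: t) =
      PySem.Chars.join (" ".toList) ((w :: t).map String.toList) ++ [' '] := by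
    intro t
    induction t with
    | nil => intro w; simp [pvConcatSp, PySem.Chars.join, List.intercalate]
    | cons b t ih =>
      intro w
      rw [pvConcatSp_cons, ih b]
      have hi : (" ".toList).intercalate (w.toList :: b.toList :: t.map String.toList) =
          w.toList ++ " ".toList ++ (" ".toList).intercalate (b.toList :: t.map String.toList) := by
        simp [List.intercalate, List.intersperse]
      simp only [PySem.Chars.join, List.map_cons] at *
      rw [hi]
      simp
  rcases ws with _ | ⟨w, t⟩
  · exact absurd rfl hne
  · rw [key t w, strip_append_space]

-- B's flag of a word equals A's test
lemma flag_eq_test (swl : Option (List String)) (w : String) :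
    pvFlag (pvStops swl) w = if pvTest swl w then 1 else 0 := by
  rcases swl with _ | ⟨_ | ⟨x, xs⟩⟩
  · simp [pvFlag, pvStops, pvTest, pvTruthy]
  · simp [pvFlag, pvStops, pvTest, pvTruthy]
  · have hc : PySem.Set.contains (PySem.Set.ofList (x :: xs)) (PySem.Str.lower w)
        = (x :: xs).contains (PySem.Str.lower w) := by
      by_cases h : PySem.Str.lower w ∈ (x :: xs) <;>
        simp [PySem.Set.contains, PySem.Set.mem_ofList, h]
    simp only [pvFlag, pvStops, hc]
    simp [pvTest, pvTruthy]

-- the prefix-sum list B's cum loop builds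
def pvCum (a : Int) : List Int → List Int
  | [] => []
  | f :: fs => (a + f) :: pvCum (a + f) fs

lemma cum_foldl (fl : List Int) : ∀ (pre : List Int) (a : Int),
    fl.foldl (fun c f => c ++ [PySem.List.pyGetD c (-1) 0 + f]) (pre ++ [a]) =
      pre ++ a :: pvCum a fl := by
  induction fl with
  | nil => intro pre a; simp [pvCum]
  | cons f fs ih =>
    intro pre a
    have hlast : PySem.List.pyGetD (pre ++ [a]) (-1) 0 = a := by
      simp [PySem.List.pyGetD, PySem.List.pyGet?_neg_one_append_singleton]
    simp only [List.foldl_cons, hlast]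
    have h2 := ih (pre ++ [a]) (a + f)
    simp only [List.append_assoc, List.singleton_append] at h2 ⊢
    rw [h2]
    simp [pvCum]

lemma cum_getD (fl : List Int) : ∀ (a : Int) (i : Nat), i ≤ fl.length →
    (a :: pvCum a fl).getD i 0 = a + (fl.take i).sum := by
  induction fl with
  | nil =>
    intro a i h
    have hi : i = 0 := by simpa using h
    subst hi; simp
  | cons f fs ih =>
    intro a i h
    cases i with
    | zero => simp
    | succ i =>
      have := ih (a + f) i (by simpa using h)
      simp only [pvCum, List.getD_cons_succ] at this ⊢
      rw [this]
      simp [List.take_succ_cons]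
      ring

-- ===== VERDICT (by name: the statement is the Claim_ definition above) =====
theorem ngram_list_spec : Claim_equal_ngram_list := by
  intro ngram wl swl _
  unfold Spec_ngram_list ngram_list ngram_list_alt
  by_cases h1 : ngram < 1
  · -- ngram ≤ 0: B returns []; A's loop appends nothing (count 0 < ngram is false)
    rw [if_pos (Or.inl h1)]
    have hlen : ngram ≤ PySem.List.len wl := by
      rw [PySem.List.len_eq]; omega
    rw [if_pos hlen]
    have htn : ngram.toNat = 0 := by omega
    rw [PySem.List.foldl_congr_mem _ _ (fun acc _ => acc) _ ?_]
    · exact PySem.List.foldl_ignore _ _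
    · intro acc n _
      simp only [htn, ngramInnerA]
      rw [if_neg (by omega : ¬ (0:Int) < ngram)]
  · -- ngram ≥ 1
    have hk1 : 1 ≤ ngram := by omega
    set k : Nat := ngram.toNat with hkdef
    have hkcast : ngram = (k : Int) := by omega
    by_cases h2 : PySem.List.len wl < ngram
    · rw [if_pos (Or.inr h2), if_neg (by omega)]
    · rw [if_neg (not_or.mpr ⟨h1, h2⟩)]
      have hkl : k ≤ wl.length := by
        rw [PySem.List.len_eq] at h2; omega
      rw [if_pos (by rw [PySem.List.len_eq]; omega)]
      -- both sides fold over the same index range; show the step functions agree there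
      apply PySem.List.foldl_congr_mem
      intro acc n hn
      rw [PySem.List.mem_pyRange_one] at hn
      obtain ⟨hn0, hnlt⟩ := hn
      set m : Nat := n.toNat with hmdef
      have hncast : n = (m : Int) := by omega
      have hmk : m + k ≤ wl.length := by
        rw [PySem.List.len_eq] at hnlt; omega
      -- A's window value
      have hA := ngramInnerA_spec wl swl k m hmk k 0 (by omega) 0 []
      set window : List String := (wl.drop m).take k with hwdef
      have hA' : ngramInnerA ngram wl swl n 0 0 [] k =
          ((window.countP (pvTest swl) : Int), pvConcatSp window) := by
        have h := hA
        simp only [Nat.cast_zero, Nat.add_zero, List.nil_append, zero_add] at h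
        rw [← hwdef] at h
        rw [hkcast, hncast]
        exact h
      -- B's cum lookups are prefix sums of the flags
      set flags : List Int := wl.map (pvFlag (pvStops swl)) with hfdef
      have hflags : flags = wl.map (fun w => if pvTest swl w then (1:Int) else 0) := by
        rw [hfdef]
        apply List.map_congr_left
        intro w _
        exact flag_eq_test swl w
      have hcum : flags.foldl (fun c f => c ++ [PySem.List.pyGetD c (-1) 0 + f]) [0] =
          0 :: pvCum 0 flags := by
        have := cum_foldl flags [] 0
        simpa using this
      have hflen : flags.length = wl.length := by rw [hfdef]; simp
      have hget1 : PySem.List.pyGetD (0 :: pvCum 0 flags) (n + ngram) 0 =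
          (flags.take (m + k)).sum := by
        rw [hncast, hkcast, show ((m:Int) + (k:Int)) = ((m + k : Nat) : Int) by push_cast; ring,
          PySem.List.pyGetD_natCast, cum_getD flags 0 (m + k) (by omega)]
        ring
      have hget2 : PySem.List.pyGetD (0 :: pvCum 0 flags) n 0 = (flags.take m).sum := by
        rw [hncast, PySem.List.pyGetD_natCast, cum_getD flags 0 m (by omega)]
        ring
      have hsum : (flags.take (m + k)).sum - (flags.take m).sum =
          ((window.countP (pvTest swl) : Nat) : Int) := by
        rw [List.take_add, List.sum_append, hflags]
        have hcomm : List.take k (List.drop m (wl.map (fun w => if pvTest swl w then (1:Int) else 0)))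
            = window.map (fun w => if pvTest swl w then (1:Int) else 0) := by
          rw [hwdef]; simp
        rw [hcomm, PySem.List.sum_map_ite_one_zero (pvTest swl) window]
        ring
      -- B's slice is the window, and its joined-stripped string is A's stripped data
      have hslice : PySem.List.slice wl (some n) (some (n + ngram)) = window := by
        rw [hncast, hkcast, show ((m:Int) + (k:Int)) = ((m + k : Nat) : Int) by push_cast; ring,
          PySem.List.slice_natCast]
        simp [hwdef]
      have hwne : window ≠ [] := by
        have : window.length = k := by
          rw [hwdef]; simp; omega
        intro hnil
        rw [hnil] at this
        simp at this
        omega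
      have hstr : String.ofList (PySem.Chars.strip (pvConcatSp window)) =
          PySem.Str.strip (PySem.Str.join " " window) := by
        rw [strip_concat_eq_strip_join window hwne]
        simp [PySem.Str.strip, PySem.Str.join]
      -- assemble
      simp only [hA', hcum, hget1, hget2, hsum, hslice, ← hstr]
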